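-- pv_equiv track=rewrite | github.com/dschwoerer/BOUT-dev | src/mesh/impls/aiolos/gen_derivs.py | parse_descriptions
-- ===== SOURCE A (Python) =====
-- def parse_descriptions(text):
--     inBlock = 0
--     descriptions = []
--     entry = [""]
--     for c in text:
--         if c == '{':
--             inBlock += 1
--         elif c == '}':
--             inBlock -= 1
--             if inBlock == 1:
--                 descriptions.append([i.strip() for i in entry])
--                 entry = [""]
--         elif inBlock == 2:
--             if c == ',':
--                 entry.append("")
--             elif c == '"':
--                 pass
--             else:
--                 entry[-1] += c
--     return descriptions
-- ===== SOURCE B (Python) =====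
-- def parse_descriptions(text):
--     descriptions = []
--     depth = 0
--     chunks = []
--     for j, segment in enumerate(text.split('{')):
--         if j > 0:
--             depth += 1
--         for k, piece in enumerate(segment.split('}')):
--             if k > 0:
--                 depth -= 1
--                 if depth == 1:
--                     body = "".join(chunks).replace('"', '')
--                     descriptions.append([f.strip() for f in body.split(',')])
--                     chunks = []
--             if depth == 2:
--                 chunks.append(piece)
--     return descriptions
-- ===== Notes on version B (the rewrite author's own statement) =====
-- stated objective: faster
-- what changed: A is a per-character state machine that mutates a field list on every char; B never scans characters in Python: it splits the text on opening braces and each segment on closing braces with str.split, walks whole chunks (depth changes once per chunk boundary), collects depth-2 chunks in a list and does quote removal, comma split and strip wholesale when a block closes.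
import Mathlib
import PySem

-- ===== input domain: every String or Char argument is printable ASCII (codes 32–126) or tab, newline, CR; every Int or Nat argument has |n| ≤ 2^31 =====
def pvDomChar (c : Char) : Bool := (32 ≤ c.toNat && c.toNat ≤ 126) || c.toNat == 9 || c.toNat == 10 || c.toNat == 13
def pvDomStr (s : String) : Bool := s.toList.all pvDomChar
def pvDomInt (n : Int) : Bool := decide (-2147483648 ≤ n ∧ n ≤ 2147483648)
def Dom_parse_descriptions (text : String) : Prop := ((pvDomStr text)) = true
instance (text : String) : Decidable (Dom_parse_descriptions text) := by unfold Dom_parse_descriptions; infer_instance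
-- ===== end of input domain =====

-- B replaces A's character-by-character state machine by a staged split-based decomposition: it
-- splits the text on opening braces and each segment on closing braces, iterates over whole text
-- chunks (depth changes once per chunk boundary), accumulates depth-2 chunks and does quote
-- removal / comma split / strip wholesale at block close (measured faster: bulk str.split
-- replaces the per-character Python loop).

-- ===== PORT A =====
-- entry[-1] += c on the (always nonempty) field list; exact for the nonempty lists A maintains
def pvAppendLast (xs : List (List Char)) (c : Char) : List (List Char) :=
  match xs with
  | [] => [[c]]
  | [x] => [x ++ [c]]
  | x :: rest => x :: pvAppendLast rest c

-- one iteration of A's for-loop on the state (inBlock, descriptions, entry)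
def pvStepA (s : Int × List (List String) × List (List Char)) (c : Char) :
    Int × List (List String) × List (List Char) :=
  let (inB, ds, entry) := s
  if c = '{' then (inB + 1, ds, entry)
  else if c = '}' then
    let inB' := inB - 1
    if inB' = 1 then
      (inB', ds ++ [entry.map (fun i => String.ofList (PySem.Chars.strip i))], [[]])
    else (inB', ds, entry)
  else if inB = 2 then
    if c = ',' then (inB, ds, entry ++ [[]])
    else if c = '"' then (inB, ds, entry)
    else (inB, ds, pvAppendLast entry c)
  else (inB, ds, entry)

def parse_descriptions (text : String) : List (List String) :=
  (text.toList.foldl pvStepA (0, [], [[]])).2.1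

-- ===== PORT B =====
-- f.strip() rendered as a String
def pvStripStr (p : List Char) : String := String.ofList (PySem.Chars.strip p)

-- body of B's inner loop: (k, piece) against the state (depth, descriptions, chunks)
def pvInnerB (s : Int × List (List String) × List (List Char)) (kp : Int × List Char) :
    Int × List (List String) × List (List Char) :=
  let (k, piece) := kp
  let s1 :=
    if 0 < k then
      let depth' := s.1 - 1
      if depth' = 1 then
        (depth',
         s.2.1 ++ [(PySem.Chars.splitOn (PySem.Chars.replace s.2.2.flatten ['"'] []) [',']).map pvStripStr],
         ([] : List (List Char)))
      else (depth', s.2.1, s.2.2)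
    else s
  if s1.1 = 2 then (s1.1, s1.2.1, s1.2.2 ++ [piece]) else s1

-- body of B's outer loop: (j, segment); the inner loop runs over enumerate(segment.split('}'))
def pvOuterB (s : Int × List (List String) × List (List Char)) (js : Int × List Char) :
    Int × List (List String) × List (List Char) :=
  let (j, segment) := js
  let s1 := if 0 < j then (s.1 + 1, s.2.1, s.2.2) else s
  (PySem.List.enumerate (PySem.Chars.splitOn segment ['}'])).foldl pvInnerB s1

def parse_descriptions_alt (text : String) : List (List String) :=
  ((PySem.List.enumerate (PySem.Chars.splitOn text.toList ['{'])).foldl pvOuterB (0, [], [])).2.1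

-- ===== PRECONDITION & SPEC =====
def Spec_parse_descriptions (text : String) (out : List (List String)) : Prop := out = parse_descriptions_alt text
instance (text : String) (out : List (List String)) : Decidable (Spec_parse_descriptions text out) := by unfold Spec_parse_descriptions; infer_instance

-- ===== CLAIM (what is proved, stated in full; the proofs are below) =====
def Claim_equal_parse_descriptions : Prop := ∀ (text : String), Dom_parse_descriptions text → Spec_parse_descriptions text (parse_descriptions text)

-- ===== LEMMAS AND PROOFS =====

-- structural single-character splitter used only in the proofs
def pvSplitC (sep : Char) : List Char → List (List Char)
  | [] => [[]]
  | c :: rest => if c = sep then [] :: pvSplitC sep rest else (pvSplitC sep rest).modifyHead (c :: ·)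

lemma pvSplitC_ne_nil (sep : Char) (xs : List Char) : pvSplitC sep xs ≠ [] := by
  induction xs with
  | nil => simp [pvSplitC]
  | cons c rest ih =>
    simp only [pvSplitC]
    split_ifs
    · simp
    · cases h : pvSplitC sep rest with
      | nil => exact absurd h ih
      | cons a as => simp [List.modifyHead]

lemma pvSplitC_cons (sep : Char) (xs : List Char) :
    ∃ a as, pvSplitC sep xs = a :: as := by
  cases h : pvSplitC sep xs with
  | nil => exact absurd h (pvSplitC_ne_nil sep xs)
  | cons a as => exact ⟨a, as, rfl⟩

lemma pvSplitOn_go_spec (sep : Char) (l : List Char) :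
    ∀ (fuel : Nat) (cur : List Char) (acc : List (List Char)),
    l.length ≤ fuel →
    PySem.Chars.splitOn.go [sep] fuel l cur acc
      = acc.reverse ++ (pvSplitC sep l).modifyHead (cur.reverse ++ ·) := by
  induction l with
  | nil =>
    intro fuel cur acc _
    cases fuel <;> simp [PySem.Chars.splitOn.go, pvSplitC]
  | cons c rest ih =>
    intro fuel cur acc hf
    cases fuel with
    | zero => simp at hf
    | succ f =>
      simp only [List.length_cons, Nat.succ_le_succ_iff] at hf
      by_cases hc : c = sep
      · subst hc
        have hpre : List.isPrefixOf [c] (c :: rest) = true := by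
          simp [List.isPrefixOf]
        simp only [PySem.Chars.splitOn.go, hpre, if_pos, List.length_cons, List.length_nil,
          List.drop_succ_cons, List.drop_zero]
        rw [ih f [] (cur.reverse :: acc) (by simpa using hf)]
        obtain ⟨a, as, h⟩ := pvSplitC_cons c rest
        simp [pvSplitC, h, List.modifyHead]
      · have hpre : List.isPrefixOf [sep] (c :: rest) = false := by
          simp [List.isPrefixOf]; exact fun h => (hc h.symm).elim
        simp only [PySem.Chars.splitOn.go, hpre]
        rw [ih f (c :: cur) acc hf]
        simp only [pvSplitC, if_neg hc]
        obtain ⟨a, as, h⟩ := pvSplitC_cons sep rest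
        simp [h, List.modifyHead]

lemma pvSplitOn_eq (sep : Char) (xs : List Char) :
    PySem.Chars.splitOn xs [sep] = pvSplitC sep xs := by
  unfold PySem.Chars.splitOn
  rw [pvSplitOn_go_spec sep xs (xs.length + 1) [] [] (by omega)]
  obtain ⟨a, as, h⟩ := pvSplitC_cons sep xs
  simp [h, List.modifyHead]

-- reconstruction: first part, then 'sep :: part' for each later part
def pvJoinSep (sep : Char) : List (List Char) → List Char
  | [] => []
  | p :: rest => p ++ rest.flatMap (fun q => sep :: q)

lemma pvJoinSep_pvSplitC (sep : Char) (cs : List Char) :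
    pvJoinSep sep (pvSplitC sep cs) = cs := by
  induction cs with
  | nil => simp [pvSplitC, pvJoinSep]
  | cons c rest ih =>
    simp only [pvSplitC]
    obtain ⟨a, as, h⟩ := pvSplitC_cons sep rest
    rw [h] at ih
    split_ifs with hc
    · subst hc
      simp only [pvJoinSep, h, List.nil_append, List.flatMap_cons] at *
      rw [← ih]
      simp
    · simp only [h, List.modifyHead, pvJoinSep] at *
      simp [← ih]

lemma pvSplitC_sep_free (sep : Char) (cs : List Char) :
    ∀ p ∈ pvSplitC sep cs, sep ∉ p := by
  induction cs with
  | nil => simp [pvSplitC]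
  | cons c rest ih =>
    simp only [pvSplitC]
    split_ifs with hc
    · intro p hp
      rcases List.mem_cons.mp hp with h | h
      · subst h; simp
      · exact ih p h
    · obtain ⟨a, as, h⟩ := pvSplitC_cons sep rest
      rw [h]
      rw [h] at ih
      intro p hp
      rcases List.mem_cons.mp hp with h2 | h2
      · subst h2
        intro hmem
        rcases List.mem_cons.mp hmem with h3 | h3
        · exact hc h3.symm
        · exact ih a (by simp) h3
      · exact ih p (by simp [h2])

lemma pvSplitC_subset (sep : Char) (cs : List Char) :
    ∀ p ∈ pvSplitC sep cs, ∀ c ∈ p, c ∈ cs := by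
  induction cs with
  | nil => simp [pvSplitC]
  | cons d rest ih =>
    simp only [pvSplitC]
    split_ifs with hd
    · intro p hp c hc
      rcases List.mem_cons.mp hp with h | h
      · subst h; simp at hc
      · exact List.mem_cons_of_mem _ (ih p h c hc)
    · obtain ⟨a, as, h⟩ := pvSplitC_cons sep rest
      rw [h]
      rw [h] at ih
      intro p hp c hc
      rcases List.mem_cons.mp hp with h2 | h2
      · subst h2
        rcases List.mem_cons.mp hc with h3 | h3
        · subst h3; simp
        · exact List.mem_cons_of_mem _ (ih a (by simp) c h3)
      · exact List.mem_cons_of_mem _ (ih p (by simp [h2]) c hc)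

-- replace(s, '"', '') is the filter dropping '"'
lemma pvReplace_go_quote (l : List Char) :
    ∀ (fuel : Nat) (acc : List Char), l.length ≤ fuel →
    PySem.Chars.replace.go ['"'] [] fuel l acc
      = acc.reverse ++ l.filter (· ≠ '"') := by
  induction l with
  | nil =>
    intro fuel acc _
    cases fuel <;> simp [PySem.Chars.replace.go]
  | cons c rest ih =>
    intro fuel acc hf
    cases fuel with
    | zero => simp at hf
    | succ f =>
      simp only [List.length_cons, Nat.succ_le_succ_iff] at hf
      by_cases hc : c = '"'
      · subst hc
        have hpre : List.isPrefixOf ['"'] ('"' :: rest) = true := by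
          simp [List.isPrefixOf]
        simp only [PySem.Chars.replace.go, hpre, if_pos, List.length_cons, List.length_nil,
          List.drop_succ_cons, List.drop_zero, List.reverse_nil, List.nil_append]
        rw [ih f acc hf]
        simp
      · have hpre : List.isPrefixOf ['"'] (c :: rest) = false := by
          simp [List.isPrefixOf]; exact fun h => (hc h.symm).elim
        simp only [PySem.Chars.replace.go, hpre]
        rw [ih f (c :: acc) hf]
        simp [hc]

lemma pvReplace_quote (cs : List Char) :
    PySem.Chars.replace cs ['"'] [] = cs.filter (· ≠ '"') := by
  unfold PySem.Chars.replace
  simp only [List.isEmpty_cons, if_neg]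
  rw [pvReplace_go_quote cs cs.length [] le_rfl]
  simp

-- A's loop over a brace-free chunk: a no-op unless inBlock = 2
lemma pvFoldA_ne2 (p : List Char) (hp : ∀ c ∈ p, c ≠ '{' ∧ c ≠ '}')
    (inB : Int) (h2 : inB ≠ 2) (ds : List (List String)) (entry : List (List Char)) :
    p.foldl pvStepA (inB, ds, entry) = (inB, ds, entry) := by
  induction p with
  | nil => rfl
  | cons c rest ih =>
    have hc := hp c (by simp)
    simp only [List.foldl_cons]
    have : pvStepA (inB, ds, entry) c = (inB, ds, entry) := by
      simp [pvStepA, hc.1, hc.2, h2]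
    rw [this]
    exact ih (fun c hc => hp c (by simp [hc]))

lemma pvSplitC_append_comma (xs : List Char) :
    pvSplitC ',' (xs ++ [',']) = pvSplitC ',' xs ++ [[]] := by
  induction xs with
  | nil => simp [pvSplitC]
  | cons c rest ih =>
    simp only [List.cons_append, pvSplitC, ih]
    split_ifs
    · rfl
    · obtain ⟨a, as, h⟩ := pvSplitC_cons ',' rest
      simp [h, List.modifyHead]

lemma pvSplitC_append_char (xs : List Char) (c : Char) (hc : c ≠ ',') :
    pvSplitC ',' (xs ++ [c]) = pvAppendLast (pvSplitC ',' xs) c := by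
  induction xs with
  | nil => simp [pvSplitC, hc, pvAppendLast, List.modifyHead]
  | cons d rest ih =>
    simp only [List.cons_append, pvSplitC, ih]
    obtain ⟨a, as, h⟩ := pvSplitC_cons ',' rest
    split_ifs with hd
    · rw [h]
      cases as with
      | nil => simp [pvAppendLast]
      | cons b bs => simp [pvAppendLast]
    · rw [h]
      cases as with
      | nil => simp [pvAppendLast, List.modifyHead]
      | cons b bs => simp [pvAppendLast, List.modifyHead]

-- A's loop over a brace-free chunk at depth 2 extends the comma-split of the buffer
lemma pvFoldA_2 (p : List Char) (hp : ∀ c ∈ p, c ≠ '{' ∧ c ≠ '}') :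
    ∀ (w : List Char) (ds : List (List String)),
    p.foldl pvStepA (2, ds, pvSplitC ',' w) = (2, ds, pvSplitC ',' (w ++ p.filter (· ≠ '"'))) := by
  induction p with
  | nil => intro w ds; simp
  | cons c rest ih =>
    intro w ds
    have hc := hp c (by simp)
    have ihr := ih (fun c hc => hp c (by simp [hc]))
    simp only [List.foldl_cons]
    by_cases h5 : c = ','
    · subst h5
      have : pvStepA (2, ds, pvSplitC ',' w) ',' = (2, ds, pvSplitC ',' (w ++ [','])) := by
        simp [pvStepA, pvSplitC_append_comma]
      rw [this, ihr]
      simp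
    · by_cases h6 : c = '"'
      · subst h6
        have : pvStepA (2, ds, pvSplitC ',' w) '"' = (2, ds, pvSplitC ',' w) := by
          simp [pvStepA]
        rw [this, ihr]
        simp
      · have : pvStepA (2, ds, pvSplitC ',' w) c = (2, ds, pvSplitC ',' (w ++ [c])) := by
          simp [pvStepA, hc.1, hc.2, h5, h6, pvSplitC_append_char w c h5]
        rw [this, ihr]
        simp [List.filter, h6]

-- the state relation between A's fold and B's fold
def pvRel (sA sB : Int × List (List String) × List (List Char)) : Prop :=
  sA.1 = sB.1 ∧ sA.2.1 = sB.2.1 ∧ sA.2.2 = pvSplitC ',' (sB.2.2.flatten.filter (· ≠ '"'))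

-- one brace-free chunk preserves the relation (A consumes the chars, B appends the chunk at depth 2)
lemma pvChunk_rel (p : List Char) (hp : ∀ c ∈ p, c ≠ '{' ∧ c ≠ '}')
    (sA sB : Int × List (List String) × List (List Char)) (h : pvRel sA sB) :
    pvRel (p.foldl pvStepA sA)
      (if sB.1 = 2 then (sB.1, sB.2.1, sB.2.2 ++ [p]) else sB) := by
  obtain ⟨h1, h2, h3⟩ := h
  obtain ⟨inB, ds, entry⟩ := sA
  obtain ⟨dep, ds', ch⟩ := sB
  simp only at h1 h2 h3
  subst h1 h2
  by_cases hd : inB = 2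
  · subst hd
    rw [h3, pvFoldA_2 p hp]
    simp only [if_pos rfl]
    refine ⟨rfl, rfl, ?_⟩
    simp [List.filter_append]
  · rw [pvFoldA_ne2 p hp inB hd, if_neg hd]
    exact ⟨rfl, rfl, h3⟩

-- A's single '}' step matches B's close branch
lemma pvClose_rel (sA sB : Int × List (List String) × List (List Char)) (h : pvRel sA sB) :
    pvRel (pvStepA sA '}')
      (let depth' := sB.1 - 1
       if depth' = 1 then
         (depth',
          sB.2.1 ++ [(PySem.Chars.splitOn (PySem.Chars.replace sB.2.2.flatten ['"'] []) [',']).map pvStripStr],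
          ([] : List (List Char)))
       else (depth', sB.2.1, sB.2.2)) := by
  obtain ⟨inB, ds, entry⟩ := sA
  obtain ⟨dep, ds', ch⟩ := sB
  obtain ⟨h1, h2, h3⟩ := h
  simp only at h1 h2 h3
  subst h1 h2
  by_cases hflush : inB - 1 = 1
  · have hA : pvStepA (inB, ds, entry) '}'
        = (inB - 1, ds ++ [entry.map (fun i => String.ofList (PySem.Chars.strip i))], [[]]) := by
      simp [pvStepA, hflush]
    rw [hA]
    simp only [if_pos hflush]
    refine ⟨rfl, ?_, by simp [pvSplitC]⟩
    rw [h3, pvReplace_quote, pvSplitOn_eq]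
    rfl
  · have hA : pvStepA (inB, ds, entry) '}' = (inB - 1, ds, entry) := by
      simp [pvStepA, hflush]
    rw [hA]
    simp only [if_neg hflush]
    exact ⟨rfl, rfl, h3⟩

-- inner loop, indices ≥ 1: each (k, piece) closes a brace then takes the chunk
lemma pvInnerTail_rel (rest : List (List Char))
    (hp : ∀ p ∈ rest, ∀ c ∈ p, c ≠ '{' ∧ c ≠ '}') :
    ∀ (m : Int), 1 ≤ m → ∀ sA sB, pvRel sA sB →
    pvRel ((rest.flatMap (fun q => '}' :: q)).foldl pvStepA sA)
      ((PySem.List.enumerate rest m).foldl pvInnerB sB) := by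
  induction rest with
  | nil => intro m _ sA sB h; simpa using h
  | cons p rest' ih =>
    intro m hm sA sB h
    simp only [List.flatMap_cons, PySem.List.enumerate_cons, List.foldl_cons, List.append_assoc,
      List.foldl_append, List.foldl_cons]
    have hclose := pvClose_rel sA sB h
    have hchunk := pvChunk_rel p (hp p (by simp)) _ _ hclose
    have hBstep : pvInnerB sB (m, p)
        = (let s1 := (let depth' := sB.1 - 1
             if depth' = 1 then
               (depth',
                sB.2.1 ++ [(PySem.Chars.splitOn (PySem.Chars.replace sB.2.2.flatten ['"'] []) [',']).map pvStripStr],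
                ([] : List (List Char)))
             else (depth', sB.2.1, sB.2.2));
           if s1.1 = 2 then (s1.1, s1.2.1, s1.2.2 ++ [p]) else s1) := by
      simp only [pvInnerB]
      rw [if_pos (by omega : (0:Int) < m)]
    rw [hBstep]
    exact ih (fun q hq => hp q (by simp [hq])) (m + 1) (by omega) _ _ hchunk

-- full inner loop over one '{'-free segment
lemma pvInner_rel (segment : List Char) (hseg : '{' ∉ segment)
    (sA sB : Int × List (List String) × List (List Char)) (h : pvRel sA sB) :
    pvRel (segment.foldl pvStepA sA)
      ((PySem.List.enumerate (PySem.Chars.splitOn segment ['}'])).foldl pvInnerB sB) := by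
  rw [pvSplitOn_eq]
  obtain ⟨p0, rest, hsplit⟩ := pvSplitC_cons '}' segment
  have hsub := pvSplitC_subset '}' segment
  have hfree := pvSplitC_sep_free '}' segment
  rw [hsplit] at hsub hfree
  have hrecon := pvJoinSep_pvSplitC '}' segment
  rw [hsplit] at hrecon
  have hchars : ∀ p ∈ p0 :: rest, ∀ c ∈ p, c ≠ '{' ∧ c ≠ '}' := by
    intro p hpmem c hc
    constructor
    · intro hcontr; subst hcontr; exact hseg (hsub p hpmem _ hc)
    · intro hcontr; subst hcontr; exact hfree p hpmem hc
  calc segment.foldl pvStepA sA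
      = (p0 ++ rest.flatMap (fun q => '}' :: q)).foldl pvStepA sA := by
        rw [← hrecon]; rfl
    _ = (rest.flatMap (fun q => '}' :: q)).foldl pvStepA (p0.foldl pvStepA sA) := by
        rw [List.foldl_append]
  rw [hsplit, PySem.List.enumerate_cons]
  simp only [List.foldl_cons]
  have hB0 : pvInnerB sB (0, p0) = (if sB.1 = 2 then (sB.1, sB.2.1, sB.2.2 ++ [p0]) else sB) := by
    simp [pvInnerB]
  rw [hB0]
  have hch := pvChunk_rel p0 (hchars p0 (by simp)) sA sB h
  exact pvInnerTail_rel rest (fun p hpm => hchars p (by simp [hpm])) 1 le_rfl _ _ hch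

-- outer loop, indices ≥ 1: each (j, segment) opens a brace then runs the inner loop
lemma pvOuterTail_rel (rest : List (List Char)) (hp : ∀ p ∈ rest, '{' ∉ p) :
    ∀ (m : Int), 1 ≤ m → ∀ sA sB, pvRel sA sB →
    pvRel ((rest.flatMap (fun q => '{' :: q)).foldl pvStepA sA)
      ((PySem.List.enumerate rest m).foldl pvOuterB sB) := by
  induction rest with
  | nil => intro m _ sA sB h; simpa using h
  | cons p rest' ih =>
    intro m hm sA sB h
    simp only [List.flatMap_cons, PySem.List.enumerate_cons, List.foldl_cons, List.append_assoc,
      List.foldl_append, List.foldl_cons]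
    have hopen : pvRel (pvStepA sA '{') (sB.1 + 1, sB.2.1, sB.2.2) := by
      obtain ⟨h1, h2, h3⟩ := h
      obtain ⟨inB, ds, entry⟩ := sA
      simp only at h1 h2 h3
      subst h1 h2
      simp only [pvStepA, if_pos rfl]
      exact ⟨rfl, rfl, h3⟩
    have hBstep : pvOuterB sB (m, p)
        = (PySem.List.enumerate (PySem.Chars.splitOn p ['}'])).foldl pvInnerB (sB.1 + 1, sB.2.1, sB.2.2) := by
      simp only [pvOuterB]
      rw [if_pos (by omega : (0:Int) < m)]
    rw [hBstep]
    have hinner := pvInner_rel p (hp p (by simp)) _ _ hopen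
    exact ih (fun q hq => hp q (by simp [hq])) (m + 1) (by omega) _ _ hinner

-- ===== VERDICT (by name: the statement is the Claim_ definition above) =====
theorem parse_descriptions_spec : Claim_equal_parse_descriptions := by
  intro text _
  unfold Spec_parse_descriptions parse_descriptions parse_descriptions_alt
  set cs := text.toList with hcs
  rw [pvSplitOn_eq]
  obtain ⟨p0, rest, hsplit⟩ := pvSplitC_cons '{' cs
  have hfree := pvSplitC_sep_free '{' cs
  rw [hsplit] at hfree
  have hrecon := pvJoinSep_pvSplitC '{' cs
  rw [hsplit] at hrecon
  have h0 : pvRel ((0 : Int), ([] : List (List String)), ([[]] : List (List Char)))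
      ((0 : Int), ([] : List (List String)), ([] : List (List Char))) := by
    exact ⟨rfl, rfl, by simp [pvSplitC]⟩
  have hinit := pvInner_rel p0 (hfree p0 (by simp)) _ _ h0
  rw [hsplit, PySem.List.enumerate_cons]
  simp only [List.foldl_cons]
  have hB0 : pvOuterB ((0 : Int), ([] : List (List String)), ([] : List (List Char))) (0, p0)
      = (PySem.List.enumerate (PySem.Chars.splitOn p0 ['}'])).foldl pvInnerB
          ((0 : Int), ([] : List (List String)), ([] : List (List Char))) := by
    simp [pvOuterB]
  rw [hB0]
  have hfold : cs.foldl pvStepA ((0 : Int), ([] : List (List String)), ([[]] : List (List Char)))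
      = (rest.flatMap (fun q => '{' :: q)).foldl pvStepA
          (p0.foldl pvStepA ((0 : Int), ([] : List (List String)), ([[]] : List (List Char)))) := by
    conv_lhs => rw [← hrecon]
    simp [pvJoinSep, List.foldl_append]
  rw [hfold]
  have hmain := pvOuterTail_rel rest (fun p hpm => hfree p (by simp [hpm])) 1 le_rfl _ _ hinit
  exact hmain.2.1
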